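-- pv_equiv track=rewrite | github.com/mgsrood/aardg_woocommerce | webhook_verwerker/utils/products.py | _build_dict_from_categories
-- ===== SOURCE A (Python) =====
-- def _build_dict_from_categories(categories, product_catalogue):
--     """Bouwt een dictionary op basis van categorieën en product catalogus."""
--     result = {category: [] for category in categories}
--
--     for sku, product_id in product_catalogue.items():
--         for category, keywords in categories.items():
--             if any(keyword in sku for keyword in keywords):
--                 result[category].append(product_id)
--                 break
--
--     return result
-- ===== SOURCE B (Python) =====
-- def _build_dict_from_categories(categories, product_catalogue):
--     """Bouwt een dictionary op basis van categorieën en product catalogus."""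
--     result = {category: [] for category in categories}
--     assigned = set()
--     for category, keywords in categories.items():
--         if len(assigned) == len(product_catalogue):
--             break
--         for sku, product_id in product_catalogue.items():
--             if sku not in assigned and any(keyword in sku for keyword in keywords):
--                 result[category].append(product_id)
--                 assigned.add(sku)
--     return result
-- ===== Notes on version B (the rewrite author's own statement) =====
-- stated objective: alternative
-- what changed: B inverts the loop nesting (categories outer, catalogue inner) and replaces A's per-SKU inner scan with break by a maintained set of already-assigned SKUs (stopping early once every SKU is assigned), which preserves first-category-wins tie-breaking.
import Mathlib
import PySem

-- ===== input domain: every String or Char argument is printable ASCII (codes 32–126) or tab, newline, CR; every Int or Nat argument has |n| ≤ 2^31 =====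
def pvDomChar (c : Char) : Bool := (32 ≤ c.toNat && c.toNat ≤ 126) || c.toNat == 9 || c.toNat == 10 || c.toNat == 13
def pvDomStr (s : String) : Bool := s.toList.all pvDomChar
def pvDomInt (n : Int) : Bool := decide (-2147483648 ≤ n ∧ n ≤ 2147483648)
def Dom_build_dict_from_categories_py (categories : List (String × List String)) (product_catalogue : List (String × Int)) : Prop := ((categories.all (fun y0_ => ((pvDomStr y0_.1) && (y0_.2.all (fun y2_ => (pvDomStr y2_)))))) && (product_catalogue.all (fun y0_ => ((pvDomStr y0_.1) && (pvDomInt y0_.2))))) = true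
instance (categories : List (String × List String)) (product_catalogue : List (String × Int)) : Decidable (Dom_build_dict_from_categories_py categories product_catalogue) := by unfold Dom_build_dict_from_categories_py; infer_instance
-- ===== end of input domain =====

-- B inverts the loop nesting (categories outer, catalogue inner) and maintains a set of
-- already-assigned SKUs instead of A's per-SKU inner scan with break; same results.

-- ===== PORT A =====
-- any(keyword in sku for keyword in keywords)  (identical expression in both Pythons)
def pvAnyKw (kws : List String) (sku : String) : Bool :=
  kws.any (fun kw => PySem.Str.isIn kw sku)

-- result = {category: [] for category in categories}  (identical line in both Pythons)
def pvInitResult (categories : List (String × List String)) : PySem.Dict String (List Int) :=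
  categories.foldl (fun d p => d.insert p.1 ([] : List Int)) PySem.Dict.empty

-- A's inner 'for category, keywords in categories.items(): … break'
def pvAInner (sku : String) (pid : Int) (cats : List (String × List String))
    (result : PySem.Dict String (List Int)) : PySem.Dict String (List Int) :=
  match cats with
  | [] => result
  | (c, kws) :: rest =>
    if pvAnyKw kws sku then result.modify c [] (fun l => l ++ [pid])
    else pvAInner sku pid rest result

def build_dict_from_categories_py (categories : List (String × List String)) (product_catalogue : List (String × Int)) : List (String × List Int) :=
  (product_catalogue.foldl (fun d p => pvAInner p.1 p.2 categories d)
    (pvInitResult categories)).items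

-- ===== PORT B =====
-- B's inner loop body: skip assigned SKUs, else append and mark assigned
def pvBStep (c : String) (kws : List String)
    (st : PySem.Dict String (List Int) × PySem.Set String) (p : String × Int) :
    PySem.Dict String (List Int) × PySem.Set String :=
  if !(PySem.Set.contains st.2 p.1) && pvAnyKw kws p.1 then
    (st.1.modify c [] (fun l => l ++ [p.2]), PySem.Set.add st.2 p.1)
  else st

-- B's outer loop over categories, with its early break once every SKU is assigned
def pvBOuter (pc : List (String × Int)) :
    List (String × List String) → PySem.Dict String (List Int) × PySem.Set String →
    PySem.Dict String (List Int) × PySem.Set String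
  | [], st => st
  | q :: rest, st =>
    if PySem.Set.len st.2 = (pc.length : Int) then st
    else pvBOuter pc rest (pc.foldl (pvBStep q.1 q.2) st)

def build_dict_from_categories_py_alt (categories : List (String × List String)) (product_catalogue : List (String × Int)) : List (String × List Int) :=
  (pvBOuter product_catalogue categories (pvInitResult categories, PySem.Set.empty)).1.items

-- ===== PRECONDITION & SPEC =====
-- Pre_ excludes association lists with duplicate keys: those cannot represent a Python dict
-- (the dict literal collapses them, after which both programs agree).
def Pre_build_dict_from_categories_py (categories : List (String × List String)) (product_catalogue : List (String × Int)) : Prop :=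
  (categories.map Prod.fst).Nodup ∧ (product_catalogue.map Prod.fst).Nodup
instance (categories : List (String × List String)) (product_catalogue : List (String × Int)) : Decidable (Pre_build_dict_from_categories_py categories product_catalogue) := by unfold Pre_build_dict_from_categories_py; infer_instance

def pvWitness_build_dict_from_categories_py : (List (String × List String)) × (List (String × Int)) :=
  ([("juice", ["JU"]), ("tea", ["TE", "JU"])], [("JU-1", 1), ("TE-2", 2), ("XX", 3)])

def Spec_build_dict_from_categories_py (categories : List (String × List String)) (product_catalogue : List (String × Int)) (out : List (String × List Int)) : Prop := out = build_dict_from_categories_py_alt categories product_catalogue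
instance (categories : List (String × List String)) (product_catalogue : List (String × Int)) (out : List (String × List Int)) : Decidable (Spec_build_dict_from_categories_py categories product_catalogue out) := by unfold Spec_build_dict_from_categories_py; infer_instance

-- ===== CLAIM (what is proved, stated in full; the proofs are below) =====
def Claim_equal_build_dict_from_categories_py : Prop := ∀ (categories : List (String × List String)) (product_catalogue : List (String × Int)), Dom_build_dict_from_categories_py categories product_catalogue → Pre_build_dict_from_categories_py categories product_catalogue → Spec_build_dict_from_categories_py categories product_catalogue (build_dict_from_categories_py categories product_catalogue)

-- ===== LEMMAS AND PROOFS =====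

-- first category (in cats order) one of whose keywords occurs in sku
def pvFM (cats : List (String × List String)) (sku : String) : Option String :=
  (cats.find? (fun q => pvAnyKw q.2 sku)).map Prod.fst

theorem pvFM_mem {cats : List (String × List String)} {sku : String} {c : String}
    (h : pvFM cats sku = some c) : c ∈ cats.map Prod.fst := by
  unfold pvFM at h
  cases hf : cats.find? (fun q => pvAnyKw q.2 sku) with
  | none => simp [hf] at h
  | some q =>
    simp [hf] at h
    exact h ▸ List.mem_map_of_mem (List.mem_of_find?_eq_some hf)

theorem pvAInner_eq (sku : String) (pid : Int) (cats : List (String × List String))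
    (d : PySem.Dict String (List Int)) :
    pvAInner sku pid cats d =
      match pvFM cats sku with
      | some c => d.modify c [] (fun l => l ++ [pid])
      | none => d := by
  induction cats with
  | nil => simp [pvAInner, pvFM]
  | cons q rest ih =>
    obtain ⟨c, kws⟩ := q
    by_cases h : pvAnyKw kws sku
    · simp [pvAInner, pvFM, h]
    · simp [pvAInner, pvFM, h] at ih ⊢
      exact ih

theorem pv_keys_modify_mem {d : PySem.Dict String (List Int)} {c : String}
    (h : c ∈ d.keys) (f : List Int → List Int) :
    (d.modify c [] f).keys = d.keys := by
  rw [PySem.Dict.keys_modify]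
  apply PySem.Dict.keys_insert_of_contains
  exact (PySem.Dict.contains_iff_mem_keys d c).mpr h

theorem pvA_keys (cats : List (String × List String)) (pc : List (String × Int)) :
    ∀ d : PySem.Dict String (List Int), (∀ q ∈ cats, q.1 ∈ d.keys) →
    (pc.foldl (fun d p => pvAInner p.1 p.2 cats d) d).keys = d.keys := by
  induction pc with
  | nil => intro d _; rfl
  | cons p rest ih =>
    intro d hd
    rw [List.foldl_cons, pvAInner_eq]
    cases hfm : pvFM cats p.1 with
    | none => exact ih d hd
    | some c =>
      have hc : c ∈ d.keys := by
        have := pvFM_mem hfm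
        simp only [List.mem_map] at this
        obtain ⟨q, hq, hq1⟩ := this
        exact hq1 ▸ hd q hq
      have hk := pv_keys_modify_mem hc (fun l => l ++ [p.2])
      rw [ih _ (by rw [hk]; exact hd), hk]

theorem pvA_getD (cats : List (String × List String)) (pc : List (String × Int)) :
    ∀ (d : PySem.Dict String (List Int)) (c : String),
    (pc.foldl (fun d p => pvAInner p.1 p.2 cats d) d).getD c [] =
      d.getD c [] ++ (pc.filter (fun p => pvFM cats p.1 == some c)).map Prod.snd := by
  induction pc with
  | nil => intro d c; simp
  | cons p rest ih =>
    intro d c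
    rw [List.foldl_cons, pvAInner_eq]
    cases hfm : pvFM cats p.1 with
    | none => simp [ih, hfm]
    | some c' =>
      by_cases hcc : c = c'
      · subst hcc
        simp [ih, hfm]
      · simp [ih, hfm, PySem.Dict.getD_modify, hcc, Ne.symm hcc]

theorem pv_contains_add (s : PySem.Set String) (y x : String) :
    (PySem.Set.add s y).contains x = (x == y || s.contains x) := by
  rw [Bool.eq_iff_iff]
  simp [PySem.Set.mem_add]
  tauto

-- second component of B's inner pass: the assigned set after one category
theorem pvB_inner_snd (c : String) (kws : List String) (pc : List (String × Int)) :
    ∀ (d : PySem.Dict String (List Int)) (s : PySem.Set String) (x : String),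
    PySem.Set.contains ((pc.foldl (pvBStep c kws) (d, s)).2) x =
      (PySem.Set.contains s x || pc.any (fun p => p.1 == x && pvAnyKw kws p.1)) := by
  induction pc with
  | nil => intro d s x; simp
  | cons p rest ih =>
    intro d s x
    rw [List.foldl_cons]
    by_cases hm : pvAnyKw kws p.1
    · by_cases hc : PySem.Set.contains s p.1
      · rw [show pvBStep c kws (d, s) p = (d, s) by
          unfold pvBStep; rw [if_neg (by rw [hc]; simp)]]
        rw [ih, List.any_cons]
        by_cases hx : p.1 = x
        · subst hx; rw [hc]; simp
        · rw [show (p.1 == x) = false by simp [hx]]; simp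
      · simp only [Bool.not_eq_true] at hc
        rw [show pvBStep c kws (d, s) p =
            (d.modify c [] (fun l => l ++ [p.2]), PySem.Set.add s p.1) by
          unfold pvBStep; rw [if_pos (by rw [hc, hm]; rfl)]]
        rw [ih, pv_contains_add, List.any_cons]
        by_cases hx : p.1 = x
        · subst hx; rw [hm]; simp
        · rw [show (x == p.1) = false by simp [Ne.symm hx],
              show (p.1 == x) = false by simp [hx]]
          simp
    · simp only [Bool.not_eq_true] at hm
      rw [show pvBStep c kws (d, s) p = (d, s) by
        unfold pvBStep; rw [if_neg (by rw [hm]; simp)]]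
      rw [ih, List.any_cons, hm]
      simp

-- first component of B's inner pass: only key c grows, by the not-yet-assigned matches
theorem pvB_inner_fst (c : String) (kws : List String) (pc : List (String × Int)) :
    ∀ (d : PySem.Dict String (List Int)) (s : PySem.Set String) (c' : String),
    (pc.map Prod.fst).Nodup →
    ((pc.foldl (pvBStep c kws) (d, s)).1).getD c' [] =
      if c' = c then
        d.getD c [] ++ (pc.filter (fun p => !(PySem.Set.contains s p.1) && pvAnyKw kws p.1)).map Prod.snd
      else d.getD c' [] := by
  induction pc with
  | nil =>
    intro d s c' _
    by_cases h : c' = c <;> simp [h]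
  | cons p rest ih =>
    intro d s c' hnd
    simp only [List.map_cons, List.nodup_cons] at hnd
    rw [List.foldl_cons]
    by_cases hm : pvAnyKw kws p.1
    · by_cases hc : PySem.Set.contains s p.1
      · rw [show pvBStep c kws (d, s) p = (d, s) by
          unfold pvBStep; rw [if_neg (by rw [hc]; simp)]]
        rw [ih _ _ _ hnd.2, List.filter_cons,
          show (!(PySem.Set.contains s p.1) && pvAnyKw kws p.1) = false by rw [hc]; simp]
        simp
      · simp only [Bool.not_eq_true] at hc
        rw [show pvBStep c kws (d, s) p =
            (d.modify c [] (fun l => l ++ [p.2]), PySem.Set.add s p.1) by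
          unfold pvBStep; rw [if_pos (by rw [hc, hm]; rfl)]]
        rw [ih _ _ _ hnd.2]
        have hfil : rest.filter (fun p' => !(PySem.Set.contains (PySem.Set.add s p.1) p'.1) && pvAnyKw kws p'.1)
            = rest.filter (fun p' => !(PySem.Set.contains s p'.1) && pvAnyKw kws p'.1) := by
          apply List.filter_congr
          intro p' hp'
          have hne : p'.1 ≠ p.1 := by
            intro he
            exact hnd.1 (he ▸ List.mem_map_of_mem hp')
          rw [pv_contains_add, show (p'.1 == p.1) = false by simp [hne]]
          simp
        rw [List.filter_cons,
          show (!(PySem.Set.contains s p.1) && pvAnyKw kws p.1) = true by rw [hc, hm]; rfl,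
          hfil]
        by_cases hcc : c' = c
        · subst hcc
          rw [if_pos rfl, if_pos rfl, PySem.Dict.getD_modify, if_pos rfl]
          simp
        · rw [if_neg hcc, if_neg hcc, PySem.Dict.getD_modify, if_neg hcc]
    · simp only [Bool.not_eq_true] at hm
      rw [show pvBStep c kws (d, s) p = (d, s) by
        unfold pvBStep; rw [if_neg (by rw [hm]; simp)]]
      rw [ih _ _ _ hnd.2, List.filter_cons,
        show (!(PySem.Set.contains s p.1) && pvAnyKw kws p.1) = false by rw [hm]; simp]
      simp

-- what B's outer loop contributes to key c, as a function of the categories suffix and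
-- the predicate P0 describing which SKUs are already assigned
def pvBSpec (pc : List (String × Int)) : (String → Bool) → List (String × List String) → String → List Int
  | _, [], _ => []
  | P0, (c0, kws) :: rest, c =>
    if c = c0 then (pc.filter (fun p => !(P0 p.1) && pvAnyKw kws p.1)).map Prod.snd
    else pvBSpec pc (fun sku => P0 sku || pvAnyKw kws sku) rest c

theorem pvBSpec_cons (pc : List (String × Int)) (P0 : String → Bool) (c0 : String)
    (kws : List String) (rest : List (String × List String)) (c : String) :
    pvBSpec pc P0 ((c0, kws) :: rest) c =
      if c = c0 then (pc.filter (fun p => !(P0 p.1) && pvAnyKw kws p.1)).map Prod.snd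
      else pvBSpec pc (fun sku => P0 sku || pvAnyKw kws sku) rest c := rfl

theorem pvBSpec_not_mem (pc : List (String × Int)) :
    ∀ (cs : List (String × List String)) (P0 : String → Bool) (c : String),
    c ∉ cs.map Prod.fst → pvBSpec pc P0 cs c = [] := by
  intro cs
  induction cs with
  | nil => intro P0 c _; rfl
  | cons q rest ih =>
    intro P0 c hc
    obtain ⟨c0, kws⟩ := q
    simp only [List.map_cons, List.mem_cons, not_or] at hc
    rw [pvBSpec_cons, if_neg hc.1]
    exact ih _ _ hc.2

theorem pvBSpec_all_true (pc : List (String × Int)) :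
    ∀ (cs : List (String × List String)) (P0 : String → Bool) (c : String),
    (∀ p ∈ pc, P0 p.1 = true) → pvBSpec pc P0 cs c = [] := by
  intro cs
  induction cs with
  | nil => intro P0 c _; rfl
  | cons q rest ih =>
    intro P0 c hP
    obtain ⟨c0, kws⟩ := q
    rw [pvBSpec_cons]
    by_cases hcc : c = c0
    · rw [if_pos hcc, show pc.filter (fun p => !(P0 p.1) && pvAnyKw kws p.1) = [] by
        rw [List.filter_eq_nil_iff]; intro p hp; rw [hP p hp]; simp]
      rfl
    · rw [if_neg hcc]
      exact ih _ _ (fun p hp => by simp [hP p hp])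

theorem pvB_inner_snd_nodup (c : String) (kws : List String) (pc : List (String × Int)) :
    ∀ (d : PySem.Dict String (List Int)) (s : PySem.Set String), s.Nodup →
    ((pc.foldl (pvBStep c kws) (d, s)).2).Nodup := by
  induction pc with
  | nil => intro d s h; exact h
  | cons p rest ih =>
    intro d s h
    rw [List.foldl_cons]
    by_cases hb : (!(PySem.Set.contains s p.1) && pvAnyKw kws p.1) = true
    · rw [show pvBStep c kws (d, s) p =
          (d.modify c [] (fun l => l ++ [p.2]), PySem.Set.add s p.1) by
        unfold pvBStep; rw [if_pos hb]]
      exact ih _ _ (PySem.Set.nodup_add s p.1 h)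
    · rw [show pvBStep c kws (d, s) p = (d, s) by unfold pvBStep; rw [if_neg hb]]
      exact ih _ _ h

theorem pvB_outer (pc : List (String × Int)) (hpc : (pc.map Prod.fst).Nodup) :
    ∀ (cs : List (String × List String)) (d : PySem.Dict String (List Int))
      (s : PySem.Set String) (P0 : String → Bool) (c : String),
    (cs.map Prod.fst).Nodup →
    (∀ p ∈ pc, PySem.Set.contains s p.1 = P0 p.1) →
    s.Nodup → (∀ x ∈ s, x ∈ pc.map Prod.fst) →
    ((pvBOuter pc cs (d, s)).1).getD c [] =
      d.getD c [] ++ pvBSpec pc P0 cs c := by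
  intro cs
  induction cs with
  | nil => intro d s P0 c _ _ _ _; simp [pvBOuter, pvBSpec]
  | cons q rest ih =>
    intro d s P0 c hnd hs hsnd hsub
    obtain ⟨c0, kws⟩ := q
    simp only [List.map_cons, List.nodup_cons] at hnd
    rw [show pvBOuter pc ((c0, kws) :: rest) (d, s) =
        if PySem.Set.len s = (pc.length : Int) then (d, s)
        else pvBOuter pc rest (pc.foldl (pvBStep c0 kws) (d, s)) from rfl]
    by_cases hlen : PySem.Set.len s = (pc.length : Int)
    · rw [if_pos hlen]
      have hlen' : (pc.map Prod.fst).length ≤ s.length := by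
        have h1 : PySem.Set.len s = (s.length : Int) := rfl
        rw [h1] at hlen
        rw [List.length_map]
        omega
      have hperm : s.Perm (pc.map Prod.fst) :=
        List.Subperm.perm_of_length_le (List.subperm_of_subset hsnd hsub) hlen'
      have hall : ∀ p ∈ pc, P0 p.1 = true := by
        intro p hp
        rw [← hs p hp]
        exact (PySem.Set.contains_iff s p.1).mpr
          (hperm.mem_iff.mpr (List.mem_map_of_mem hp))
      rw [pvBSpec_all_true pc _ _ c hall, List.append_nil]
    · rw [if_neg hlen]
      have hpair : (pc.foldl (pvBStep c0 kws) (d, s)) =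
          ((pc.foldl (pvBStep c0 kws) (d, s)).1, (pc.foldl (pvBStep c0 kws) (d, s)).2) := rfl
      rw [hpair]
      have hs1 : ∀ p ∈ pc, PySem.Set.contains ((pc.foldl (pvBStep c0 kws) (d, s)).2) p.1 =
          (P0 p.1 || pvAnyKw kws p.1) := by
        intro p hp
        rw [pvB_inner_snd]
        rw [hs p hp]
        by_cases hm : pvAnyKw kws p.1
        · have : pc.any (fun p' => p'.1 == p.1 && pvAnyKw kws p'.1) = true := by
            rw [List.any_eq_true]
            exact ⟨p, hp, by simp [hm]⟩
          simp [this, hm]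
        · have : pc.any (fun p' => p'.1 == p.1 && pvAnyKw kws p'.1) = false := by
            rw [List.any_eq_false]
            intro p' hp'
            by_cases he : p'.1 = p.1
            · simp [he, hm]
            · simp [he]
          simp [this, hm]
      have hsnd1 : ((pc.foldl (pvBStep c0 kws) (d, s)).2).Nodup :=
        pvB_inner_snd_nodup c0 kws pc d s hsnd
      have hsub1 : ∀ x ∈ (pc.foldl (pvBStep c0 kws) (d, s)).2, x ∈ pc.map Prod.fst := by
        intro x hx
        have hcx : PySem.Set.contains ((pc.foldl (pvBStep c0 kws) (d, s)).2) x = true :=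
          (PySem.Set.contains_iff _ x).mpr hx
        rw [pvB_inner_snd] at hcx
        rcases Bool.or_eq_true_iff.mp hcx with h | h
        · exact hsub x ((PySem.Set.contains_iff s x).mp h)
        · rw [List.any_eq_true] at h
          obtain ⟨p, hp, hpx⟩ := h
          have : p.1 = x := by
            have := Bool.and_eq_true_iff.mp hpx
            exact beq_iff_eq.mp this.1
          exact this ▸ List.mem_map_of_mem hp
      rw [ih _ _ (fun sku => P0 sku || pvAnyKw kws sku) c hnd.2 hs1 hsnd1 hsub1]
      rw [pvB_inner_fst _ _ _ _ _ _ hpc]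
      have hfil : pc.filter (fun p => !(PySem.Set.contains s p.1) && pvAnyKw kws p.1)
          = pc.filter (fun p => !(P0 p.1) && pvAnyKw kws p.1) := by
        apply List.filter_congr
        intro p hp
        rw [hs p hp]
      by_cases hcc : c = c0
      · subst hcc
        rw [if_pos rfl, hfil, pvBSpec_not_mem _ _ _ _ hnd.1, List.append_nil,
          pvBSpec_cons, if_pos rfl]
      · rw [if_neg hcc, pvBSpec_cons, if_neg hcc]

theorem pvBSpec_eq_fm (pc : List (String × Int)) :
    ∀ (cs : List (String × List String)) (P0 : String → Bool) (c : String),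
    (cs.map Prod.fst).Nodup →
    pvBSpec pc P0 cs c =
      (pc.filter (fun p => !(P0 p.1) && (pvFM cs p.1 == some c))).map Prod.snd := by
  intro cs
  induction cs with
  | nil =>
    intro P0 c _
    simp [pvBSpec, pvFM]
  | cons q rest ih =>
    intro P0 c hnd
    obtain ⟨c0, kws⟩ := q
    simp only [List.map_cons, List.nodup_cons] at hnd
    have hfm : ∀ sku, pvFM ((c0, kws) :: rest) sku =
        if pvAnyKw kws sku then some c0 else pvFM rest sku := by
      intro sku
      unfold pvFM
      rw [List.find?_cons]
      by_cases hm : pvAnyKw kws sku <;> simp [hm]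
    rw [pvBSpec_cons]
    by_cases hcc : c = c0
    · subst hcc
      rw [if_pos rfl]
      congr 1
      apply List.filter_congr
      intro p _
      rw [hfm p.1]
      by_cases hm : pvAnyKw kws p.1
      · simp [hm]
      · have : pvFM rest p.1 ≠ some c := by
          intro h
          exact hnd.1 (pvFM_mem h)
        simp [hm, this]
    · rw [if_neg hcc, ih _ c hnd.2]
      congr 1
      apply List.filter_congr
      intro p _
      rw [hfm p.1]
      by_cases hm : pvAnyKw kws p.1
      · simp [hm, Ne.symm hcc]
      · simp [hm]

theorem pvInit_keys (categories : List (String × List String))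
    (h : (categories.map Prod.fst).Nodup) :
    (pvInitResult categories).keys = categories.map Prod.fst := by
  unfold pvInitResult
  rw [PySem.Dict.keys_foldl_insert_key (key := Prod.fst) (f := fun _ _ => ([] : List Int))]
  rw [PySem.Dict.keys_empty, PySem.Set.update_nil_left, PySem.Set.ofList_eq_self_of_nodup _ h]

theorem pvB_inner_keys (c : String) (kws : List String) (pc : List (String × Int)) :
    ∀ (d : PySem.Dict String (List Int)) (s : PySem.Set String), c ∈ d.keys →
    ((pc.foldl (pvBStep c kws) (d, s)).1).keys = d.keys := by
  induction pc with
  | nil => intro d s _; rfl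
  | cons p rest ih =>
    intro d s hc
    rw [List.foldl_cons]
    by_cases hb : (!(PySem.Set.contains s p.1) && pvAnyKw kws p.1) = true
    · rw [show pvBStep c kws (d, s) p =
          (d.modify c [] (fun l => l ++ [p.2]), PySem.Set.add s p.1) by
            unfold pvBStep; rw [if_pos hb]]
      have hk := pv_keys_modify_mem hc (fun l => l ++ [p.2])
      rw [ih _ _ (by rw [hk]; exact hc), hk]
    · rw [show pvBStep c kws (d, s) p = (d, s) by unfold pvBStep; rw [if_neg hb]]
      exact ih _ _ hc

theorem pvB_keys (pc : List (String × Int)) :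
    ∀ (cs : List (String × List String)) (d : PySem.Dict String (List Int))
      (s : PySem.Set String), (∀ q ∈ cs, q.1 ∈ d.keys) →
    ((pvBOuter pc cs (d, s)).1).keys = d.keys := by
  intro cs
  induction cs with
  | nil => intro d s _; rfl
  | cons q rest ih =>
    intro d s hd
    rw [show pvBOuter pc (q :: rest) (d, s) =
        if PySem.Set.len s = (pc.length : Int) then (d, s)
        else pvBOuter pc rest (pc.foldl (pvBStep q.1 q.2) (d, s)) from rfl]
    by_cases hlen : PySem.Set.len s = (pc.length : Int)
    · rw [if_pos hlen]
    · rw [if_neg hlen]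
      have hq : q.1 ∈ d.keys := hd q (List.mem_cons_self)
      have hk := pvB_inner_keys q.1 q.2 pc d s hq
      have hpair : (pc.foldl (pvBStep q.1 q.2) (d, s)) =
          ((pc.foldl (pvBStep q.1 q.2) (d, s)).1, (pc.foldl (pvBStep q.1 q.2) (d, s)).2) := rfl
      rw [hpair, ih _ _ (by rw [hk]; intro q' hq'; exact hd q' (List.mem_cons_of_mem _ hq')), hk]

-- ===== VERDICT (by name: the statement is the Claim_ definition above) =====
theorem build_dict_from_categories_py_spec : Claim_equal_build_dict_from_categories_py := by
  intro categories product_catalogue _ hpre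
  obtain ⟨hcats, hpc⟩ := hpre
  unfold Spec_build_dict_from_categories_py
  unfold build_dict_from_categories_py build_dict_from_categories_py_alt
  have hinitk := pvInit_keys categories hcats
  have hmem : ∀ q ∈ categories, q.1 ∈ (pvInitResult categories).keys := by
    intro q hq; rw [hinitk]; exact List.mem_map_of_mem hq
  have hAk := pvA_keys categories product_catalogue (pvInitResult categories) hmem
  have hBk := pvB_keys product_catalogue categories (pvInitResult categories) PySem.Set.empty hmem
  have hknd : (pvInitResult categories).keys.Nodup := by rw [hinitk]; exact hcats
  rw [PySem.Dict.items_eq_map_keys _ (by rw [hAk]; exact hknd) []]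
  rw [PySem.Dict.items_eq_map_keys _ (by rw [hBk]; exact hknd) []]
  rw [hAk, hBk]
  apply List.map_congr_left
  intro c _
  congr 1
  rw [pvA_getD]
  rw [pvB_outer product_catalogue hpc categories (pvInitResult categories) PySem.Set.empty
    (fun _ => false) c hcats (by intro p _; simp) List.nodup_nil (by intro x hx; simp at hx)]
  rw [pvBSpec_eq_fm _ _ _ _ hcats]
  simp
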